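-- pv_equiv track=rewrite | github.com/samarthraj/practice_basics | hashmap_problem9.py | function
-- ===== SOURCE A (Python) =====
-- def function(a, b):
--     new_list = a + b
--     hashmap = {}
--     out = 0
--
--     for i in range(0, len(new_list)):
--         if new_list[i] in hashmap:
--             hashmap[new_list[i]] += 1
--         else:
--             hashmap[new_list[i]] = 1
--
--     for keys, value in hashmap.items():
--         if value == 1:
--             out = out + keys
--     return out
-- ===== SOURCE B (Python) =====
-- def function(a, b):
--     merged = sorted(a + b)
--     out = 0
--     i = 0
--     n = len(merged)
--     while i < n:
--         j = i + 1
--         while j < n and merged[j] == merged[i]: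
--             j += 1
--         if j == i + 1:
--             out += merged[i]
--         i = j
--     return out
-- ===== Notes on version B (the rewrite author's own statement) =====
-- stated objective: alternative
-- what changed: Replaces the hashmap counting pass and dict-items scan by sorting a+b and a single run-length walk over the sorted list, adding elements whose run has length exactly 1.
import Mathlib
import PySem

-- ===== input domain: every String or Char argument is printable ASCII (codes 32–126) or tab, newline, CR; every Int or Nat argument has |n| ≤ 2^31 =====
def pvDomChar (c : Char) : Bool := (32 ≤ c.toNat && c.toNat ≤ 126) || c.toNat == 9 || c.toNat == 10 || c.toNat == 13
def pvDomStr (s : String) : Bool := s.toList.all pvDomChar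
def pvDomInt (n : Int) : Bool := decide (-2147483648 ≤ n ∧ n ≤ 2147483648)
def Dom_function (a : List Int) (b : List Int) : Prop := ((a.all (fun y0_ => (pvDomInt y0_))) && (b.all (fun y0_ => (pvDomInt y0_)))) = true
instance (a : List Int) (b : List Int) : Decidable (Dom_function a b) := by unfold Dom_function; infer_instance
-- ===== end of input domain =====

-- B replaces the dict-counting pass and dict-items scan by sorting a+b and one run-length
-- walk over the sorted list (alternative decomposition, not claimed faster).

-- ===== PORT A =====
def function (a : List Int) (b : List Int) : Int :=
  let new_list := a ++ b
  let hashmap : PySem.Dict Int Int :=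
    (PySem.List.pyRange 0 (new_list.length : Int) 1).foldl
      (fun d i =>
        let x := PySem.List.pyGetD new_list i 0
        if d.contains x then d.insert x (d.getD x 0 + 1) else d.insert x 1)
      PySem.Dict.empty
  hashmap.items.foldl (fun out kv => if kv.2 = 1 then out + kv.1 else out) 0

-- ===== PORT B =====
-- the outer while loop of Source B: each step consumes one run of equal elements
def funScan : List Int → Int → Int
  | [], out => out
  | x :: rest, out =>
      funScan (rest.dropWhile (fun y => y == x))
        (if (rest.takeWhile (fun y => y == x)).length = 0 then out + x else out)
  termination_by l _ => l.length
  decreasing_by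
    simp only [List.length_cons]
    exact Nat.lt_succ_of_le (List.length_dropWhile_le _ _)

def function_alt (a : List Int) (b : List Int) : Int :=
  funScan (PySem.List.sorted (a ++ b) id false) 0

-- ===== PRECONDITION & SPEC =====
def Spec_function (a : List Int) (b : List Int) (out : Int) : Prop := out = function_alt a b
instance (a : List Int) (b : List Int) (out : Int) : Decidable (Spec_function a b out) := by unfold Spec_function; infer_instance

-- ===== CLAIM (what is proved, stated in full; the proofs are below) =====
def Claim_equal_function : Prop := ∀ (a : List Int) (b : List Int), Dom_function a b → Spec_function a b (function a b)

-- ===== LEMMAS AND PROOFS =====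

-- the common value both programs compute: sum of the distinct elements with count 1
def onceSum (xs : List Int) : Int :=
  ∑ k ∈ xs.toFinset, (if xs.count k = 1 then k else 0)

-- folding A's items loop is the sum of the selected keys
theorem foldl_if_sum (L : List (Int × Int)) (c : Int) :
    L.foldl (fun out kv => if kv.2 = 1 then out + kv.1 else out) c
      = c + (L.map (fun kv => if kv.2 = 1 then kv.1 else 0)).sum := by
  induction L generalizing c with
  | nil => simp
  | cons p L ih =>
      simp only [List.foldl_cons, List.map_cons, List.sum_cons, ih]
      split_ifs <;> ring

theorem function_eq_onceSum (a b : List Int) :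
    function a b = onceSum (a ++ b) := by
  simp only [function]
  rw [show (List.foldl
        (fun (d : PySem.Dict Int Int) i =>
          if d.contains (PySem.List.pyGetD (a ++ b) i 0) = true then
            d.insert (PySem.List.pyGetD (a ++ b) i 0) (d.getD (PySem.List.pyGetD (a ++ b) i 0) 0 + 1)
          else d.insert (PySem.List.pyGetD (a ++ b) i 0) 1)
        PySem.Dict.empty (PySem.List.pyRange 0 ((a ++ b).length : Int) 1))
      = List.foldl
        (fun (d : PySem.Dict Int Int) x =>
          if d.contains x then d.insert x (d.getD x 0 + 1) else d.insert x 1)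
        PySem.Dict.empty (a ++ b)
    from PySem.List.foldl_pyRange_zero_pyGetD' (a ++ b) 0
      (fun (d : PySem.Dict Int Int) (x : Int) =>
        if d.contains x then d.insert x (d.getD x 0 + 1) else d.insert x 1)
      PySem.Dict.empty]
  have hbody : (fun (d : PySem.Dict Int Int) (x : Int) =>
      if d.contains x then d.insert x (d.getD x 0 + 1) else d.insert x 1)
      = fun d x => d.insert x (d.getD x 0 + 1) := by
    funext d x
    split_ifs with h
    · rfl
    · have h0 : d.getD x 0 = 0 := by
        simp only [PySem.Dict.getD]
        rw [(PySem.Dict.get?_eq_none_iff_contains d x).mpr (by simp [h])]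
        rfl
      rw [h0]
      norm_num
  rw [hbody, PySem.Dict.foldl_insert_getD_add_one_eq_counter,
    PySem.Dict.items_counter, foldl_if_sum]
  rw [List.map_map]
  have hfun : ((fun kv : Int × Int => if kv.2 = 1 then kv.1 else 0) ∘
      fun k => (k, ((a ++ b).count k : Int)))
      = fun k => if (a ++ b).count k = 1 then k else 0 := by
    funext k
    simp only [Function.comp]
    norm_cast
  rw [hfun]
  have hnd : (PySem.Set.ofList (a ++ b)).Nodup := PySem.Set.nodup_ofList _
  rw [← List.sum_toFinset _ hnd]
  have htf : (PySem.Set.ofList (a ++ b)).toFinset = (a ++ b).toFinset := by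
    ext k
    simp [PySem.Set.mem_ofList]
  rw [htf, onceSum]
  simp

-- x does not survive dropping its own run from a sorted tail
theorem not_mem_dropWhile_of_sorted (x : Int) :
    ∀ (l : List Int), l.Pairwise (· ≤ ·) → (∀ y ∈ l, x ≤ y) →
      x ∉ l.dropWhile (fun y => y == x) := by
  intro l
  induction l with
  | nil => simp
  | cons y l ih =>
      intro hp hle
      by_cases hyx : y = x
      · subst hyx
        rw [List.dropWhile_cons_of_pos (by simp)]
        exact ih hp.of_cons (fun z hz => hle z (List.mem_cons_of_mem _ hz))
      · rw [List.dropWhile_cons_of_neg (by simp [hyx])]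
        intro hx
        rcases List.mem_cons.mp hx with h | h
        · exact hyx h.symm
        · have h1 : y ≤ x := (List.pairwise_cons.mp hp).1 x h
          have h2 : x ≤ y := hle y (List.mem_cons_self)
          exact hyx (le_antisymm h1 h2)

-- the run-length walk over a sorted list computes onceSum
theorem funScan_sorted (l : List Int) (c : Int) :
    l.Pairwise (· ≤ ·) → funScan l c = c + onceSum l := by
  induction l, c using funScan.induct with
  | case1 _ => intro _; simp [funScan, onceSum]
  | case2 x rest c ih =>
      intro hp
      set run := rest.takeWhile (fun y => y == x) with hrun
      set t := rest.dropWhile (fun y => y == x) with ht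
      have hsplit : run ++ t = rest := List.takeWhile_append_dropWhile
      have hrunx : ∀ y ∈ run, y = x := by
        intro y hy
        have := List.mem_takeWhile_imp hy
        simpa using this
      have hxt : x ∉ t := by
        refine not_mem_dropWhile_of_sorted x rest hp.of_cons ?_
        exact fun y hy => (List.pairwise_cons.mp hp).1 y hy
      have htsorted : t.Pairwise (· ≤ ·) :=
        hp.of_cons.sublist (List.dropWhile_sublist _)
      -- toFinset of x :: rest is insert x t.toFinset
      have htf : (x :: rest).toFinset = insert x t.toFinset := by
        ext k
        simp only [List.mem_toFinset, List.mem_cons, Finset.mem_insert, ← hsplit,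
          List.mem_append]
        constructor
        · rintro (h | h | h)
          · exact Or.inl h
          · exact Or.inl (hrunx k h)
          · exact Or.inr (by simpa using h)
        · rintro (h | h)
          · exact Or.inl h
          · exact Or.inr (Or.inr (by simpa using h))
      have hxtf : x ∉ t.toFinset := by simpa using hxt
      -- counts
      have hcx : (x :: rest).count x = run.length + 1 := by
        rw [List.count_cons_self, ← hsplit, List.count_append]
        have h1 : run.count x = run.length := by
          rw [List.count_eq_length]
          intro y hy; exact ((hrunx y hy) ▸ rfl)
        have h2 : t.count x = 0 := List.count_eq_zero.mpr hxt
        omega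
      have hck : ∀ k ∈ t.toFinset, (x :: rest).count k = t.count k := by
        intro k hk
        have hkt : k ∈ t := List.mem_toFinset.mp hk
        have hkx : k ≠ x := fun h => hxt (h ▸ hkt)
        rw [List.count_cons_of_ne (Ne.symm hkx), ← hsplit, List.count_append]
        have : run.count k = 0 := by
          rw [List.count_eq_zero]
          intro hkr; exact hkx (hrunx k hkr)
        omega
      have honce : onceSum (x :: rest)
          = (if run.length = 0 then x else 0) + onceSum t := by
        unfold onceSum
        rw [htf, Finset.sum_insert hxtf, hcx]
        congr 1
        · by_cases h : run.length = 0 <;> simp [h]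
        · exact Finset.sum_congr rfl (fun k hk => by rw [hck k hk])
      rw [funScan, ← hrun, ← ht, honce]
      have ih' := ih htsorted
      split_ifs at ih' ⊢ <;> rw [ih'] <;> ring

theorem function_alt_eq_onceSum (a b : List Int) :
    function_alt a b = onceSum (a ++ b) := by
  unfold function_alt
  rw [funScan_sorted _ 0 (by simpa using PySem.List.sorted_pairwise (a ++ b) id)]
  have hperm : (PySem.List.sorted (a ++ b) id false).Perm (a ++ b) :=
    PySem.List.sorted_perm _ _ _
  unfold onceSum
  rw [List.toFinset_eq_of_perm _ _ hperm]
  rw [zero_add]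
  exact Finset.sum_congr rfl (fun k _ => by rw [hperm.count_eq])

-- ===== VERDICT (by name: the statement is the Claim_ definition above) =====
theorem function_spec : Claim_equal_function := by
  intro a b _
  unfold Spec_function
  rw [function_eq_onceSum, function_alt_eq_onceSum]
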